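-- pv_equiv track=rewrite | github.com/Andarch/h3mex | src/services/minimap_preview_service.py | _should_skip_object
-- ===== SOURCE A (Python) =====
-- def _should_skip_object(blockmask: list[int], interactivemask: list[int]) -> bool:
--     has_yellow_tiles = False
--     has_red_tiles = False
--     has_red_or_yellow_tiles = False
--
--     for b, i in zip(blockmask, interactivemask):
--         if i == 1:
--             has_yellow_tiles = True
--         if b == 0 and i == 0:
--             has_red_tiles = True
--         if b == 0:
--             has_red_or_yellow_tiles = True
--
--         if has_red_tiles:
--             return False
--
--     return (has_yellow_tiles and not has_red_tiles) or not has_red_or_yellow_tiles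
-- ===== SOURCE B (Python) =====
-- def _should_skip_object(blockmask: list[int], interactivemask: list[int]) -> bool:
--     pairs = list(zip(blockmask, interactivemask))
--     for b, i in pairs:
--         if b == 0 and i == 0:
--             return False
--     has_yellow = any(i == 1 for _, i in pairs)
--     has_red_or_yellow = any(b == 0 for b, _ in pairs)
--     return has_yellow or not has_red_or_yellow
-- ===== Notes on version B (the rewrite author's own statement) =====
-- stated objective: simpler
-- what changed: A's single fused loop with three mutated flags is split into a dedicated early-exit scan for a red tile (b==0 and i==0) followed by two declarative any() aggregations over the zipped pairs; the has_red_tiles flag disappears entirely.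
import Mathlib
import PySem

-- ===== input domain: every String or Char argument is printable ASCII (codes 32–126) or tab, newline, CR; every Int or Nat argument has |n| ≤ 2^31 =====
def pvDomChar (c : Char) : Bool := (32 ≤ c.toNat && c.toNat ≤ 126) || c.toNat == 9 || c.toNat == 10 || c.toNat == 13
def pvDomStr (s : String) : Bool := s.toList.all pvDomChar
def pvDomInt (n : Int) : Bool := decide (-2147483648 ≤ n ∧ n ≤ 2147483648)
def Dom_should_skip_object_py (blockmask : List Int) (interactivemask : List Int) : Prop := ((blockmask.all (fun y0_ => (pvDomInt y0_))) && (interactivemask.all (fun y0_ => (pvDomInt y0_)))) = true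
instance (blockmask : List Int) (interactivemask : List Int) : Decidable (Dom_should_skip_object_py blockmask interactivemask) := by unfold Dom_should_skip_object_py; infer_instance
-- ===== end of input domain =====

-- B replaces A's fused three-flag loop by an early-exit red scan plus two any() aggregations (objective: simpler).
-- ===== PORT A =====
-- loop of A: accumulators (has_yellow_tiles, has_red_tiles, has_red_or_yellow_tiles), early return False when has_red_tiles
def pvALoop : List (Int × Int) → Bool → Bool → Bool → Bool
  | [], hy, hr, hroy => (hy && !hr) || !hroy
  | (b, i) :: rest, hy, hr, hroy =>
    let hy := if i == 1 then true else hy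
    let hr := if b == 0 && i == 0 then true else hr
    let hroy := if b == 0 then true else hroy
    if hr then false else pvALoop rest hy hr hroy

def should_skip_object_py (blockmask : List Int) (interactivemask : List Int) : Bool :=
  pvALoop (blockmask.zip interactivemask) false false false

-- ===== PORT B =====
-- early-exit scan of B's first loop: is there a pair with b == 0 and i == 0?
def pvFindRed : List (Int × Int) → Bool
  | [] => false
  | (b, i) :: rest => if b == 0 && i == 0 then true else pvFindRed rest

def should_skip_object_py_alt (blockmask : List Int) (interactivemask : List Int) : Bool :=
  let pairs := blockmask.zip interactivemask
  if pvFindRed pairs then false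
  else
    let has_yellow := pairs.any (fun p => p.2 == 1)
    let has_red_or_yellow := pairs.any (fun p => p.1 == 0)
    has_yellow || !has_red_or_yellow

-- ===== PRECONDITION & SPEC =====
def Spec_should_skip_object_py (blockmask : List Int) (interactivemask : List Int) (out : Bool) : Prop := out = should_skip_object_py_alt blockmask interactivemask
instance (blockmask : List Int) (interactivemask : List Int) (out : Bool) : Decidable (Spec_should_skip_object_py blockmask interactivemask out) := by unfold Spec_should_skip_object_py; infer_instance

-- ===== CLAIM (what is proved, stated in full; the proofs are below) =====
def Claim_equal_should_skip_object_py : Prop := ∀ (blockmask : List Int) (interactivemask : List Int), Dom_should_skip_object_py blockmask interactivemask → Spec_should_skip_object_py blockmask interactivemask (should_skip_object_py blockmask interactivemask)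

-- ===== LEMMAS AND PROOFS =====
theorem pvALoop_eq (pairs : List (Int × Int)) (hy hroy : Bool) :
    pvALoop pairs hy false hroy =
      if pvFindRed pairs then false
      else (hy || pairs.any (fun p => p.2 == 1)) || !(hroy || pairs.any (fun p => p.1 == 0)) := by
  induction pairs generalizing hy hroy with
  | nil => simp [pvALoop, pvFindRed]
  | cons p rest ih =>
    obtain ⟨b, i⟩ := p
    by_cases hred : (b == 0 && i == 0) = true
    · simp [pvALoop, pvFindRed, hred]
    · simp only [pvALoop, pvFindRed, hred, Bool.false_eq_true, if_false]
      rw [ih]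
      by_cases hf : pvFindRed rest = true
      · simp [hf]
      · simp only [hf, Bool.false_eq_true, if_false, List.any_cons]
        cases hi : (i == 1) <;> cases hb : (b == 0) <;>
          simp_all [Bool.or_comm, Bool.or_left_comm]

-- ===== VERDICT (by name: the statement is the Claim_ definition above) =====
theorem should_skip_object_py_spec : Claim_equal_should_skip_object_py := by
  intro bm im _
  unfold Spec_should_skip_object_py should_skip_object_py should_skip_object_py_alt
  rw [pvALoop_eq]
  simp
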